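-- pv_equiv track=rewrite | github.com/esl-epfl/ESL-CGRA-simulator | full_automation/generate.py | tlat_loop
-- ===== SOURCE A (Python) =====
-- OP_LAT = {
--     "NOP": 1,
--     "EXIT": 2,
--     "SADD": 1,
--     "SSUB": 1,
--     "SLT": 1,
--     "SRT": 1,
--     "SRA": 1,
--     "LAND": 1,
--     "LOR": 1,
--     "LXOR": 1,
--     "SMUL": 3,
--     "FXPMUL": 3,
--     "BSFA": 1,
--     "BZFA": 1,
--     "BEQ": 1,
--     "BNE": 1,
--     "BLT": 1,
--     "BGE": 1,
--     "JUMP": 1,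
--     "LWD": 2,
--     "SWD": 2,
--     "LWI": 2,
--     "SWI": 2,
--     "LNAND": 1,
--     "LNOR": 1,
--     "LXNOR": 1,
-- }
--
-- def tlat(I):
--     return sum(
--         max(OP_LAT.get(op.replace(",", " ").split()[0], 1) for row in g for op in row)
--         for g in I
--     )
--
-- def tlat_loop(I, loop):
--     if not loop:
--         return tlat(I)
--     s, e, n = loop
--     t = 0
--     for i, g in enumerate(I):
--         mx = max(
--             OP_LAT.get(op.replace(",", " ").split()[0], 1) for row in g for op in row
--         )
--         t += mx * (n if s <= i <= e else 1)
--     return t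
-- ===== SOURCE B (Python) =====
-- # Tiered classification: instead of looking every op up in OP_LAT and taking a max,
-- # classify each group by short-circuit membership in the two latency-tier sets.
-- TIER3 = {"SMUL", "FXPMUL"}          # ops with latency 3
-- TIER2 = {"EXIT", "LWD", "SWD", "LWI", "SWI"}  # ops with latency 2; everything else is 1
--
--
-- def _glat(g):
--     tokens = [op.replace(",", " ").split()[0] for row in g for op in row]
--     if any(t in TIER3 for t in tokens):
--         return 3
--     if any(t in TIER2 for t in tokens):
--         return 2
--     return 1
--
--
-- def tlat_loop(I, loop):
--     total = 0
--     i = 0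
--     for g in I:
--         w = 1
--         if loop:
--             s, e, n = loop
--             if s <= i <= e:
--                 w = n
--         total += w * _glat(g)
--         i += 1
--     return total
-- ===== Notes on version B (the rewrite author's own statement) =====
-- stated objective: alternative
-- what changed: B drops the OP_LAT dict and the per-group max entirely: it classifies each group into a latency tier (3/2/1) by set membership of its first tokens in two tier sets (valid because OP_LAT only takes values 1,2,3 with default 1), and accumulates weighted tiers with an explicit counter instead of enumerate.
import Mathlib
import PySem

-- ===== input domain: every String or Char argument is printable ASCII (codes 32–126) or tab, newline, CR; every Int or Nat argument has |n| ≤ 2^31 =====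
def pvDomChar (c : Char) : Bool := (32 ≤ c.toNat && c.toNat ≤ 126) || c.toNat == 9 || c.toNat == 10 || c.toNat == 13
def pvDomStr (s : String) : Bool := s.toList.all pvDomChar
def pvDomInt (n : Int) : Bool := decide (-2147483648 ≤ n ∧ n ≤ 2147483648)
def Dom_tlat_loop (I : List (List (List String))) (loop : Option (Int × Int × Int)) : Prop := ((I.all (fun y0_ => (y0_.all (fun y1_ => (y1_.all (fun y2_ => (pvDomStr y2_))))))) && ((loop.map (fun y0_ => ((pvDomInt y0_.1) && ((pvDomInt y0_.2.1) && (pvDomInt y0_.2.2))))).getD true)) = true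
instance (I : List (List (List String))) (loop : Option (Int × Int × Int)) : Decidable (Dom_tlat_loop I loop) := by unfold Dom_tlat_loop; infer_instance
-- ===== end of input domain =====

-- B replaces A's dict-lookup-and-max per group by a tiered classification: a group's latency is 3 if
-- any first token is in the tier-3 set, else 2 if any is in the tier-2 set, else 1 (exact because
-- OP_LAT's values are only 1, 2, 3 with default 1); the weighted accumulation uses an explicit counter.

-- ===== PORT A =====
-- module constant OP_LAT
def opLatDict : PySem.Dict String Int := PySem.Dict.ofList [
  ("NOP", 1), ("EXIT", 2), ("SADD", 1), ("SSUB", 1), ("SLT", 1), ("SRT", 1), ("SRA", 1),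
  ("LAND", 1), ("LOR", 1), ("LXOR", 1), ("SMUL", 3), ("FXPMUL", 3), ("BSFA", 1),
  ("BZFA", 1), ("BEQ", 1), ("BNE", 1), ("BLT", 1), ("BGE", 1), ("JUMP", 1), ("LWD", 2),
  ("SWD", 2), ("LWI", 2), ("SWI", 2), ("LNAND", 1), ("LNOR", 1), ("LXNOR", 1)]

-- OP_LAT.get(op.replace(",", " ").split()[0], 1); the [0] index is total here only under Pre_
def opVal (op : String) : Int :=
  opLatDict.getD (PySem.List.pyGetD (PySem.Str.split₀ (PySem.Str.replace op "," " ")) 0 "") 1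

-- max(... for row in g for op in row); Python's max raises on an empty generator (excluded by Pre_)
def groupMax (g : List (List String)) : Int :=
  (PySem.List.max? ((g.flatMap (fun row => row)).map opVal) (fun x => x)).getD 0

def tlat (I : List (List (List String))) : Int := (I.map groupMax).sum

def tlat_loop (I : List (List (List String))) (loop : Option (Int × Int × Int)) : Int :=
  match loop with
  | none => tlat I
  | some (s, e, n) =>
    (PySem.List.enumerate I 0).foldl
      (fun t ig => t + groupMax ig.2 * (if s ≤ ig.1 ∧ ig.1 ≤ e then n else 1)) 0

-- ===== PORT B =====
def tier3 : PySem.Set String := PySem.Set.ofList ["SMUL", "FXPMUL"]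
def tier2 : PySem.Set String := PySem.Set.ofList ["EXIT", "LWD", "SWD", "LWI", "SWI"]

-- op.replace(",", " ").split()[0] (the [0] raises on an empty/whitespace op: excluded by Pre_)
def firstTok (op : String) : String :=
  PySem.List.pyGetD (PySem.Str.split₀ (PySem.Str.replace op "," " ")) 0 ""

def glat (g : List (List String)) : Int :=
  let tokens := (g.flatMap (fun row => row)).map firstTok
  if tokens.any (fun t => PySem.Set.contains tier3 t) then 3
  else if tokens.any (fun t => PySem.Set.contains tier2 t) then 2
  else 1

def tlat_loop_alt (I : List (List (List String))) (loop : Option (Int × Int × Int)) : Int :=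
  (I.foldl (fun st g =>
      let w : Int := match loop with
        | none => 1
        | some (s, e, n) => if s ≤ st.2 ∧ st.2 ≤ e then n else 1
      (st.1 + w * glat g, st.2 + 1)) ((0 : Int), (0 : Int))).1

-- ===== PRECONDITION & SPEC =====
-- Pre_ excludes exactly the inputs where Python A raises: a group with no ops at all
-- (max of an empty generator → ValueError) or an op that is empty/whitespace-only
-- (split()[0] → IndexError).
def Pre_tlat_loop (I : List (List (List String))) (_loop : Option (Int × Int × Int)) : Prop :=
  ∀ g ∈ I, (g.flatMap (fun row => row)) ≠ [] ∧
    ∀ op ∈ g.flatMap (fun row => row), PySem.Str.split₀ (PySem.Str.replace op "," " ") ≠ []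
instance (I : List (List (List String))) (loop : Option (Int × Int × Int)) : Decidable (Pre_tlat_loop I loop) := by unfold Pre_tlat_loop; infer_instance

def pvWitness_tlat_loop : List (List (List String)) × (Option (Int × Int × Int)) :=
  ([[["SADD"], ["SMUL", "foo"]], [["LWD"]]], some (0, 0, 3))

def Spec_tlat_loop (I : List (List (List String))) (loop : Option (Int × Int × Int)) (out : Int) : Prop := out = tlat_loop_alt I loop
instance (I : List (List (List String))) (loop : Option (Int × Int × Int)) (out : Int) : Decidable (Spec_tlat_loop I loop out) := by unfold Spec_tlat_loop; infer_instance

-- ===== CLAIM =====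
def Claim_equal_tlat_loop : Prop := ∀ (I : List (List (List String))) (loop : Option (Int × Int × Int)), Dom_tlat_loop I loop → Pre_tlat_loop I loop → Spec_tlat_loop I loop (tlat_loop I loop)

-- ===== LEMMAS AND PROOFS =====

-- the latency of a single op, expressed through B's tier sets
set_option maxHeartbeats 2000000 in
lemma opVal_tier (op : String) :
    opVal op = if PySem.Set.contains tier3 (firstTok op) then 3
               else if PySem.Set.contains tier2 (firstTok op) then 2 else 1 := by
  unfold opVal firstTok
  generalize (PySem.List.pyGetD (PySem.Str.split₀ (PySem.Str.replace op "," " ")) 0 "") = k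
  have hd : opLatDict = PySem.Dict.mk [
    ("NOP", 1), ("EXIT", 2), ("SADD", 1), ("SSUB", 1), ("SLT", 1), ("SRT", 1), ("SRA", 1),
    ("LAND", 1), ("LOR", 1), ("LXOR", 1), ("SMUL", 3), ("FXPMUL", 3), ("BSFA", 1),
    ("BZFA", 1), ("BEQ", 1), ("BNE", 1), ("BLT", 1), ("BGE", 1), ("JUMP", 1), ("LWD", 2),
    ("SWD", 2), ("LWI", 2), ("SWI", 2), ("LNAND", 1), ("LNOR", 1), ("LXNOR", 1)] := by decide
  rw [hd, PySem.Dict.getD_eq_get?_getD]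
  simp only [PySem.Dict.get?_mk_cons]
  by_cases h0 : k = "NOP"
  · subst h0; decide
  by_cases h1 : k = "EXIT"
  · subst h1; decide
  by_cases h2 : k = "SADD"
  · subst h2; decide
  by_cases h3 : k = "SSUB"
  · subst h3; decide
  by_cases h4 : k = "SLT"
  · subst h4; decide
  by_cases h5 : k = "SRT"
  · subst h5; decide
  by_cases h6 : k = "SRA"
  · subst h6; decide
  by_cases h7 : k = "LAND"
  · subst h7; decide
  by_cases h8 : k = "LOR"
  · subst h8; decide
  by_cases h9 : k = "LXOR"
  · subst h9; decide
  by_cases h10 : k = "SMUL"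
  · subst h10; decide
  by_cases h11 : k = "FXPMUL"
  · subst h11; decide
  by_cases h12 : k = "BSFA"
  · subst h12; decide
  by_cases h13 : k = "BZFA"
  · subst h13; decide
  by_cases h14 : k = "BEQ"
  · subst h14; decide
  by_cases h15 : k = "BNE"
  · subst h15; decide
  by_cases h16 : k = "BLT"
  · subst h16; decide
  by_cases h17 : k = "BGE"
  · subst h17; decide
  by_cases h18 : k = "JUMP"
  · subst h18; decide
  by_cases h19 : k = "LWD"
  · subst h19; decide
  by_cases h20 : k = "SWD"
  · subst h20; decide
  by_cases h21 : k = "LWI"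
  · subst h21; decide
  by_cases h22 : k = "SWI"
  · subst h22; decide
  by_cases h23 : k = "LNAND"
  · subst h23; decide
  by_cases h24 : k = "LNOR"
  · subst h24; decide
  by_cases h25 : k = "LXNOR"
  · subst h25; decide
  have hne : ∀ s : String, k ≠ s → (s == k) = false := fun s h => beq_eq_false_iff_ne.mpr (fun e => h e.symm)
  simp only [hne _ h0, hne _ h1, hne _ h2, hne _ h3, hne _ h4, hne _ h5, hne _ h6, hne _ h7, hne _ h8, hne _ h9, hne _ h10, hne _ h11, hne _ h12, hne _ h13, hne _ h14, hne _ h15, hne _ h16, hne _ h17, hne _ h18, hne _ h19, hne _ h20, hne _ h21, hne _ h22, hne _ h23, hne _ h24, hne _ h25]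
  simp [tier3, tier2, PySem.Set.ofList, PySem.Set.contains, PySem.Dict.get?,
    h1, h10, h11, h19, h20, h21, h22]


-- elements of the mapped latency list are 1, 2 or 3, read off the tier sets
lemma opVal_le_three (op : String) : opVal op ≤ 3 := by
  rw [opVal_tier op]; split_ifs <;> omega

lemma groupMax_eq_glat (g : List (List String)) (h : g.flatMap (fun row => row) ≠ []) :
    groupMax g = glat g := by
  unfold groupMax glat
  set F := g.flatMap (fun row => row) with hF
  obtain ⟨m, hm⟩ : ∃ m, PySem.List.max? (F.map opVal) (fun x => x) = some m := by
    rcases Option.eq_none_or_eq_some (PySem.List.max? (F.map opVal) (fun x => x)) with h0 | h0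
    · rw [PySem.List.max?_eq_none_iff] at h0
      exact absurd (List.map_eq_nil_iff.mp h0) h
    · exact h0
  have hmem : m ∈ F.map opVal := PySem.List.max?_mem hm
  have hmax : ∀ y ∈ F.map opVal, y ≤ m := PySem.List.max?_isMax hm
  rw [hm]
  simp only [Option.getD_some]
  by_cases h3 : (F.map firstTok).any (fun t => PySem.Set.contains tier3 t)
  · rw [if_pos h3]
    rcases List.any_eq_true.mp h3 with ⟨t, ht, hc⟩
    rcases List.mem_map.mp ht with ⟨op, hop, rfl⟩
    have h3v : opVal op = 3 := by rw [opVal_tier op, if_pos hc]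
    have hle : 3 ≤ m := h3v ▸ hmax _ (List.mem_map_of_mem hop)
    rcases List.mem_map.mp hmem with ⟨op', _, rfl⟩
    have := opVal_le_three op'
    omega
  · rw [if_neg h3]
    have hno3 : ∀ op ∈ F, ¬ PySem.Set.contains tier3 (firstTok op) := by
      intro op hop hc
      exact h3 (List.any_eq_true.mpr ⟨firstTok op, List.mem_map_of_mem hop, hc⟩)
    have hle2 : ∀ op ∈ F, opVal op ≤ 2 := by
      intro op hop
      rw [opVal_tier op, if_neg (hno3 op hop)]
      split_ifs <;> omega
    by_cases h2 : (F.map firstTok).any (fun t => PySem.Set.contains tier2 t)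
    · rw [if_pos h2]
      rcases List.any_eq_true.mp h2 with ⟨t, ht, hc⟩
      rcases List.mem_map.mp ht with ⟨op, hop, rfl⟩
      have h2v : opVal op = 2 := by
        rw [opVal_tier op, if_neg (hno3 op hop), if_pos hc]
      have hle : 2 ≤ m := h2v ▸ hmax _ (List.mem_map_of_mem hop)
      rcases List.mem_map.mp hmem with ⟨op', hop', rfl⟩
      have := hle2 op' hop'
      omega
    · rw [if_neg h2]
      have hno2 : ∀ op ∈ F, ¬ PySem.Set.contains tier2 (firstTok op) := by
        intro op hop hc
        exact h2 (List.any_eq_true.mpr ⟨firstTok op, List.mem_map_of_mem hop, hc⟩)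
      rcases List.mem_map.mp hmem with ⟨op', hop', rfl⟩
      rw [opVal_tier op', if_neg (hno3 op' hop'), if_neg (hno2 op' hop')]

-- A's weighted enumerate-fold equals B's counter-fold (the some case), any start index/accumulators
lemma fold_eq (s e n : Int) (I : List (List (List String)))
    (hPre : ∀ g ∈ I, g.flatMap (fun row => row) ≠ []) (k t : Int) :
    (PySem.List.enumerate I k).foldl
      (fun t ig => t + groupMax ig.2 * (if s ≤ ig.1 ∧ ig.1 ≤ e then n else 1)) t
    = (I.foldl (fun st g =>
        (st.1 + (if s ≤ st.2 ∧ st.2 ≤ e then n else (1 : Int)) * glat g, st.2 + 1)) (t, k)).1 := by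
  induction I generalizing k t with
  | nil => simp [PySem.List.enumerate_nil]
  | cons g gs ih =>
    simp only [PySem.List.enumerate_cons, List.foldl_cons]
    rw [ih (fun g hg => hPre g (List.mem_cons_of_mem _ hg))]
    rw [groupMax_eq_glat g (hPre g List.mem_cons_self)]
    ring_nf

-- the none case: B's counter-fold with weight 1 is the plain sum of glats
lemma fold_one (I : List (List (List String))) (k t : Int) :
    (I.foldl (fun st g => (st.1 + 1 * glat g, st.2 + 1)) (t, k)).1 = t + (I.map glat).sum := by
  induction I generalizing k t with
  | nil => simp
  | cons g gs ih =>
    simp only [List.foldl_cons, List.map_cons, List.sum_cons]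
    rw [ih]
    ring

-- ===== VERDICT =====
theorem tlat_loop_spec : Claim_equal_tlat_loop := by
  intro I loop _ hPre
  unfold Spec_tlat_loop tlat_loop tlat_loop_alt tlat
  match loop with
  | none =>
    simp only
    rw [fold_one]
    simp [List.map_congr_left (fun g hg => groupMax_eq_glat g ((hPre g hg).1))]
  | some (s, e, n) =>
    simp only
    rw [fold_eq s e n I (fun g hg => (hPre g hg).1)]
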